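-- pv_equiv track=rewrite | github.com/frankye1000/0511_HW_PotterKata | potter.py | group_into_sets
-- ===== SOURCE A (Python) =====
-- def group_into_sets(books):
--     # 1) Gather books into the largest sets possible
--     # 2) Return a list of the size of each set
--     set_sizes = []
--     while books:
--         unique_books = set(books)
--         set_sizes.append(len(unique_books))
--         for b in unique_books:
--             books.remove(b)
--     return set_sizes
-- ===== SOURCE B (Python) =====
-- def group_into_sets(books):
--     # Count multiplicities once, histogram the counts, then suffix-sum the
--     # histogram: the k-th set holds every title occurring at least k times.
--     counts = {}
--     for b in books:
--         counts[b] = counts.get(b, 0) + 1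
--     hist = {}
--     m = 0
--     for v in counts.values():
--         hist[v] = hist.get(v, 0) + 1
--         if v > m:
--             m = v
--     sizes = []
--     running = 0
--     for k in range(m, 0, -1):
--         running += hist.get(k, 0)
--         sizes.append(running)
--     sizes.reverse()
--     return sizes
-- ===== Notes on version B (the rewrite author's own statement) =====
-- stated objective: faster
-- what changed: Instead of repeatedly taking set(books) and removing one copy of each distinct book per layer, B counts multiplicities in one pass, histograms the counts, and suffix-sums the histogram so layer k's size is the number of distinct books occurring at least k times.
import Mathlib
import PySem

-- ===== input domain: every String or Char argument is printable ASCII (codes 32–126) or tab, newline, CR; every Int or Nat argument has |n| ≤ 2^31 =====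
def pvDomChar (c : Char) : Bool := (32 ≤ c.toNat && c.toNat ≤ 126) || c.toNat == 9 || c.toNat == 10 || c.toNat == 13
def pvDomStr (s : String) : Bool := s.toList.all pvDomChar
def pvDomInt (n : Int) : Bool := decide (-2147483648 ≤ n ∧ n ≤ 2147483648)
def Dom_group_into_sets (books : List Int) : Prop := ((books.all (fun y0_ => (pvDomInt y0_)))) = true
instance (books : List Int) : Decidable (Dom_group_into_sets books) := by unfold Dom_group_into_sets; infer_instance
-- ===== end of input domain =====

-- B replaces A's repeated layer-peeling (set + remove per layer) with one counting
-- pass plus a suffix-summed histogram of the multiplicities (objective: faster).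
-- Python A empties the caller's list in place; B does not — the equivalence proved
-- here is about the return value only.

-- ===== PORT A =====
-- 'for b in unique_books: books.remove(b)' — one first-occurrence removal per
-- distinct book (removal order does not affect the resulting list).
def pvRemoveEach (u bs : List Int) : List Int :=
  u.foldl (fun bs b => (PySem.List.remove? bs b).getD bs) bs

-- length lemma needed by the port's termination proof (cited in decreasing_by)
theorem pvRemoveEach_length : ∀ (u bs : List Int), u.Nodup → (∀ b ∈ u, b ∈ bs) →
    (pvRemoveEach u bs).length = bs.length - u.length := by
  intro u
  induction u with
  | nil => intro bs _ _; simp [pvRemoveEach]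
  | cons b u ih =>
    intro bs hnd hmem
    have hb : b ∈ bs := hmem b (by simp)
    have : pvRemoveEach (b :: u) bs = pvRemoveEach u (bs.erase b) := by
      simp [pvRemoveEach, PySem.List.remove?_eq_some_erase bs b hb]
    rw [this, ih (bs.erase b) hnd.of_cons]
    · rw [List.length_erase_of_mem hb]
      have : 1 ≤ bs.length := List.length_pos_of_mem hb
      simp; omega
    · intro c hc
      exact (List.mem_erase_of_ne (fun h => (List.nodup_cons.mp hnd).1 (by rw [← h]; exact hc))).mpr (hmem c (by simp [hc]))

def group_into_sets (books : List Int) : List Int :=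
  if h : books = [] then []
  else
    ((PySem.Set.ofList books).length : Int) ::
      group_into_sets (pvRemoveEach (PySem.Set.ofList books) books)
termination_by books.length
decreasing_by
  have hnd := PySem.Set.nodup_ofList books
  have hmem : ∀ b ∈ PySem.Set.ofList books, b ∈ books :=
    fun b hb => (PySem.Set.mem_ofList books b).mp hb
  rw [pvRemoveEach_length _ _ hnd hmem]
  have hne : PySem.Set.ofList books ≠ [] := by
    cases books with
    | nil => exact absurd rfl h
    | cons x xs =>
      intro hu
      have hx : x ∈ PySem.Set.ofList (x :: xs) := (PySem.Set.mem_ofList (x :: xs) x).mpr (by simp)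
      rw [hu] at hx
      simp at hx
  have h1 : 1 ≤ (PySem.Set.ofList books).length := List.length_pos_of_ne_nil hne
  have h2 : 1 ≤ books.length := List.length_pos_of_ne_nil h
  omega

-- ===== PORT B =====
def group_into_sets_alt (books : List Int) : List Int :=
  let counts := books.foldl (fun d b => d.insert b (d.getD b 0 + 1)) PySem.Dict.empty
  let hm := counts.values.foldl
    (fun (p : PySem.Dict Int Int × Int) v =>
      (p.1.insert v (p.1.getD v 0 + 1), if v > p.2 then v else p.2))
    (PySem.Dict.empty, 0)
  let rs := (PySem.List.pyRange hm.2 0 (-1)).foldl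
    (fun (p : Int × List Int) k =>
      (p.1 + hm.1.getD k 0, p.2 ++ [p.1 + hm.1.getD k 0]))
    (0, [])
  rs.2.reverse

-- ===== PRECONDITION & SPEC =====
def Spec_group_into_sets (books : List Int) (out : List Int) : Prop := out = group_into_sets_alt books
instance (books : List Int) (out : List Int) : Decidable (Spec_group_into_sets books out) := by unfold Spec_group_into_sets; infer_instance

-- ===== CLAIM (what is proved, stated in full; the proofs are below) =====
def Claim_equal_group_into_sets : Prop := ∀ (books : List Int), Dom_group_into_sets books → Spec_group_into_sets books (group_into_sets books)

-- ===== LEMMAS AND PROOFS =====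

-- the common specification: layer i (i = 0 .. maxcount-1) holds the distinct books
-- occurring more than i times
def pvM (books : List Int) : Nat :=
  ((PySem.List.dedup books).map books.count).foldl max 0

def pvC (books : List Int) (k : Nat) : Nat :=
  (PySem.List.dedup books).countP (fun x => decide (k ≤ books.count x))

def pvSpec (books : List Int) : List Int :=
  (List.range (pvM books)).map (fun i => (pvC books (i + 1) : Int))

-- ---- generic fold-max helpers ----
theorem foldlMax_le_init : ∀ (l : List Nat) (a : Nat), a ≤ l.foldl max a := by
  intro l
  induction l with
  | nil => simp
  | cons x l ih => intro a; exact le_trans (le_max_left a x) (ih (max a x))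

theorem foldlMax_le_of_mem : ∀ (l : List Nat) (a x : Nat), x ∈ l → x ≤ l.foldl max a := by
  intro l
  induction l with
  | nil => simp
  | cons y l ih =>
    intro a x hx
    rcases List.mem_cons.mp hx with h | h
    · subst h; exact le_trans (le_max_right a x) (foldlMax_le_init l (max a x))
    · exact ih (max a y) x h

theorem foldlMax_cases : ∀ (l : List Nat) (a : Nat), l.foldl max a = a ∨ l.foldl max a ∈ l := by
  intro l
  induction l with
  | nil => simp
  | cons x l ih =>
    intro a
    simp only [List.foldl_cons]
    rcases ih (max a x) with h | h
    · rw [h]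
      rcases max_cases a x with ⟨he, _⟩ | ⟨he, _⟩
      · left; exact he
      · right; rw [he]; exact List.mem_cons_self
    · right; exact List.mem_cons_of_mem x h

theorem foldlMax_ub : ∀ (l : List Nat) (a b : Nat), a ≤ b → (∀ x ∈ l, x ≤ b) → l.foldl max a ≤ b := by
  intro l
  induction l with
  | nil => simpa using fun a b h _ => h
  | cons x l ih =>
    intro a b ha hall
    exact ih (max a x) b (max_le ha (hall x (by simp))) (fun y hy => hall y (by simp [hy]))

-- ---- counting after removing one copy of each distinct element ----
theorem count_removeEach : ∀ (u bs : List Int), u.Nodup → (∀ b ∈ u, b ∈ bs) →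
    ∀ x, (pvRemoveEach u bs).count x = bs.count x - (if x ∈ u then 1 else 0) := by
  intro u
  induction u with
  | nil => intro bs _ _ x; simp [pvRemoveEach]
  | cons b u ih =>
    intro bs hnd hmem x
    have hb : b ∈ bs := hmem b (by simp)
    have hstep : pvRemoveEach (b :: u) bs = pvRemoveEach u (bs.erase b) := by
      simp [pvRemoveEach, PySem.List.remove?_eq_some_erase bs b hb]
    have hsub : ∀ c ∈ u, c ∈ bs.erase b := fun c hc =>
      (List.mem_erase_of_ne (fun h => (List.nodup_cons.mp hnd).1 (by rw [← h]; exact hc))).mpr (hmem c (by simp [hc]))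
    rw [hstep, ih (bs.erase b) hnd.of_cons hsub x, List.count_erase]
    by_cases hxb : x = b
    · subst hxb
      have hxu : x ∉ u := (List.nodup_cons.mp hnd).1
      have : 1 ≤ bs.count x := List.one_le_count_iff.mpr hb
      simp [hxu]
    · have : (b == x) = false := by simpa using fun h => hxb h.symm
      simp [this, hxb]

theorem count_layer (books : List Int) :
    ∀ x, (pvRemoveEach (PySem.Set.ofList books) books).count x = books.count x - 1 := by
  intro x
  have hnd := PySem.Set.nodup_ofList books
  have hmem : ∀ b ∈ PySem.Set.ofList books, b ∈ books :=
    fun b hb => (PySem.Set.mem_ofList books b).mp hb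
  rw [count_removeEach _ _ hnd hmem x]
  by_cases hx : x ∈ books
  · simp [(PySem.Set.mem_ofList books x).mpr hx]
  · have h0 : books.count x = 0 := List.count_eq_zero.mpr hx
    have : x ∉ PySem.Set.ofList books := fun h => hx ((PySem.Set.mem_ofList books x).mp h)
    simp [this, h0]

-- countP agrees on two nodup lists containing the same satisfying elements
theorem countP_nodup_congr (l₁ l₂ : List Int) (p : Int → Bool)
    (h₁ : l₁.Nodup) (h₂ : l₂.Nodup)
    (h : ∀ x, p x = true → (x ∈ l₁ ↔ x ∈ l₂)) : l₁.countP p = l₂.countP p := by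
  rw [List.countP_eq_length_filter, List.countP_eq_length_filter]
  refine List.Perm.length_eq ?_
  rw [List.perm_ext_iff_of_nodup (h₁.filter p) (h₂.filter p)]
  intro a
  simp only [List.mem_filter]
  constructor
  · rintro ⟨ha, hp⟩; exact ⟨(h a hp).mp ha, hp⟩
  · rintro ⟨ha, hp⟩; exact ⟨(h a hp).mpr ha, hp⟩

-- ---- the layer step, expressed on the spec quantities ----
theorem mem_layer (books : List Int) (x : Int) :
    x ∈ pvRemoveEach (PySem.Set.ofList books) books ↔ 2 ≤ books.count x := by
  rw [show (x ∈ pvRemoveEach (PySem.Set.ofList books) books) ↔ 0 < (pvRemoveEach (PySem.Set.ofList books) books).count x from List.count_pos_iff.symm, count_layer books x]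
  omega

theorem pvC_layer (books : List Int) (k : Nat) (hk : 1 ≤ k) :
    pvC (pvRemoveEach (PySem.Set.ofList books) books) k = pvC books (k + 1) := by
  set books' := pvRemoveEach (PySem.Set.ofList books) books with hb'
  unfold pvC
  have step1 : (PySem.List.dedup books').countP (fun x => decide (k ≤ books'.count x))
      = (PySem.List.dedup books).countP (fun x => decide (k ≤ books'.count x)) := by
    refine countP_nodup_congr _ _ _ (PySem.List.nodup_dedup books') (PySem.List.nodup_dedup books) ?_
    intro x hp
    have hkx : k ≤ books'.count x := of_decide_eq_true hp
    have hx' : x ∈ books' := List.count_pos_iff.mp (by omega)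
    have hx : 2 ≤ books.count x := (mem_layer books x).mp hx'
    have hxb : x ∈ books := List.count_pos_iff.mp (by omega)
    rw [PySem.List.mem_dedup, PySem.List.mem_dedup]
    exact ⟨fun _ => hxb, fun _ => hx'⟩
  rw [step1]
  refine List.countP_congr ?_
  intro x hx
  have hxb : x ∈ books := (PySem.List.mem_dedup books x).mp hx
  have h1 : 1 ≤ books.count x := List.one_le_count_iff.mpr hxb
  have := count_layer books x
  simp only [decide_eq_true_eq, hb'] at *
  rw [this]
  omega

theorem pvM_pos (books : List Int) (h : books ≠ []) : 1 ≤ pvM books := by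
  obtain ⟨x, xs, rfl⟩ := List.exists_cons_of_ne_nil h
  have hx : x ∈ PySem.List.dedup (x :: xs) := (PySem.List.mem_dedup _ x).mpr (by simp)
  have hc : (x :: xs).count x ∈ (PySem.List.dedup (x :: xs)).map (x :: xs).count :=
    List.mem_map.mpr ⟨x, hx, rfl⟩
  have h1 : 1 ≤ (x :: xs).count x := List.one_le_count_iff.mpr (by simp)
  exact le_trans h1 (foldlMax_le_of_mem _ 0 _ hc)

theorem count_le_pvM (books : List Int) (x : Int) (hx : x ∈ books) :
    books.count x ≤ pvM books := by
  exact foldlMax_le_of_mem _ 0 _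
    (List.mem_map.mpr ⟨x, (PySem.List.mem_dedup books x).mpr hx, rfl⟩)

theorem pvM_layer (books : List Int) (h : books ≠ []) :
    pvM (pvRemoveEach (PySem.Set.ofList books) books) = pvM books - 1 := by
  set books' := pvRemoveEach (PySem.Set.ofList books) books with hb'
  have hub : pvM books' ≤ pvM books - 1 := by
    refine foldlMax_ub _ 0 _ (by omega) ?_
    intro c hc
    obtain ⟨x, hx, rfl⟩ := List.mem_map.mp hc
    have hx' : x ∈ books' := (PySem.List.mem_dedup books' x).mp hx
    have h2 : 2 ≤ books.count x := (mem_layer books x).mp hx'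
    have hxb : x ∈ books := List.count_pos_iff.mp (by omega)
    have := count_le_pvM books x hxb
    rw [count_layer books x]
    omega
  rcases Nat.lt_or_ge (pvM books) 2 with hm | hm
  · have h1 := pvM_pos books h
    -- pvM books = 1: no book occurs twice, books' is empty-layered
    omega
  · -- the maximum is attained at some x with count = pvM books ≥ 2
    have hcases := foldlMax_cases ((PySem.List.dedup books).map books.count) 0
    rcases hcases with hz | hmem
    · have := pvM_pos books h
      unfold pvM at this
      omega
    · obtain ⟨x, hx, hcx⟩ := List.mem_map.mp hmem
      have hx2 : 2 ≤ books.count x := by unfold pvM at hm; rw [hcx]; exact hm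
      have hx' : x ∈ books' := (mem_layer books x).mpr hx2
      have hlb : books'.count x ≤ pvM books' := count_le_pvM books' x hx'
      rw [count_layer books x] at hlb
      have : books.count x = pvM books := hcx
      omega

theorem pvC_one (books : List Int) :
    pvC books 1 = (PySem.List.dedup books).length := by
  unfold pvC
  rw [show (PySem.List.dedup books).length = (PySem.List.dedup books).countP (fun _ => true) by
    simp [List.countP_eq_length_filter]]
  refine List.countP_congr ?_
  intro x hx
  have : x ∈ books := (PySem.List.mem_dedup books x).mp hx
  simp [List.one_le_count_iff.mpr this]

-- ---- A computes the spec ----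
theorem spec_layer (books : List Int) (h : books ≠ []) :
    pvSpec books = ((PySem.List.dedup books).length : Int)
      :: pvSpec (pvRemoveEach (PySem.Set.ofList books) books) := by
  unfold pvSpec
  rw [pvM_layer books h]
  obtain ⟨m, hm⟩ : ∃ m, pvM books = m + 1 :=
    ⟨pvM books - 1, by have := pvM_pos books h; omega⟩
  rw [hm]
  simp only [Nat.add_sub_cancel, List.range_succ_eq_map, List.map_cons, List.map_map]
  congr 1
  · rw [pvC_one]
  · refine List.map_congr_left ?_
    intro i _
    simp only [Function.comp]
    rw [pvC_layer books (i + 1) (by omega)]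

theorem A_eq_spec : ∀ (books : List Int), group_into_sets books = pvSpec books := by
  intro books
  fun_induction group_into_sets books with
  | case1 =>
    simp [pvSpec, pvM, PySem.List.dedup]
  | case2 books h ih =>
    rw [spec_layer books h, ← ih, PySem.List.dedup_eq_ofList]

-- ---- B computes the spec ----

-- suffix count of the multiplicity list
def pvT (vs : List Int) (k : Nat) : Nat := vs.countP (fun v => decide ((k : Int) ≤ v))

theorem pvT_step (vs : List Int) (k : Nat) :
    pvT vs k = vs.count (k : Int) + pvT vs (k + 1) := by
  unfold pvT
  induction vs with
  | nil => simp
  | cons v vs ih =>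
    simp only [List.countP_cons, List.count_cons, ih]
    by_cases h1 : (k : Int) ≤ v
    · by_cases h2 : (k : Int) + 1 ≤ v
      · have hne : ¬ v = (k : Int) := by omega
        simp [h1, h2, hne]
        omega
      · have heq : v = (k : Int) := by omega
        simp [heq]
        omega
    · have h2 : ¬ ((k : Int) + 1 ≤ v) := by omega
      have hne : ¬ v = (k : Int) := by omega
      simp [h1, h2, hne]

-- the descending running-sum loop, fully generalized
theorem fold_suffix (vs : List Int) :
    ∀ (a : Nat) (r : Int) (s : List Int),
    ((PySem.List.pyRange (a : Int) 0 (-1)).foldl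
      (fun (p : Int × List Int) k =>
        (p.1 + ((PySem.Dict.counter vs).getD k 0), p.2 ++ [p.1 + ((PySem.Dict.counter vs).getD k 0)]))
      (r, s)).2
    = s ++ (List.range a).map (fun i => r + ((pvT vs (a - i) : Int) - (pvT vs (a + 1) : Int))) := by
  intro a
  induction a with
  | zero =>
    intro r s
    rw [PySem.List.pyRange_neg_one_eq_nil (by norm_num)]
    simp
  | succ a ih =>
    intro r s
    rw [PySem.List.pyRange_neg_one_cons (by push_cast; omega)]
    have hsub : ((a : Int) + 1) - 1 = (a : Int) := by ring
    simp only [List.foldl_cons]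
    push_cast
    rw [hsub, ih]
    have hcnt : (PySem.Dict.counter vs).getD ((a : Int) + 1) 0 = (vs.count ((a : Int) + 1) : Int) := by
      rw [show ((a : Int) + 1) = (((a + 1 : Nat)) : Int) by push_cast; ring]
      exact PySem.Dict.getD_counter vs _
    have hT : (vs.count (((a + 1 : Nat) : Int)) : Int) = (pvT vs (a + 1) : Int) - (pvT vs (a + 2) : Int) := by
      have := pvT_step vs (a + 1)
      push_cast [this]; ring
    rw [List.range_succ_eq_map]
    simp only [List.map_cons, List.map_map, List.append_assoc, List.singleton_append]
    congr 1
    congr 1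
    · rw [hcnt]
      have : (a : Int) + 1 = (((a + 1 : Nat)) : Int) := by push_cast; ring
      rw [this, hT]
      simp
    · refine List.map_congr_left ?_
      intro i hi
      simp only [Function.comp]
      rw [hcnt]
      have h1 : a + 1 - Nat.succ i = a - i := by omega
      have : (a : Int) + 1 = (((a + 1 : Nat)) : Int) := by push_cast; ring
      rw [this, hT]
      simp [h1]
      ring

theorem B_eq_spec : ∀ (books : List Int), group_into_sets_alt books = pvSpec books := by
  intro books
  unfold group_into_sets_alt
  simp only []
  rw [PySem.Dict.foldl_insert_getD_add_one_eq_counter]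
  -- the (hist, m) pair-fold splits into its two component folds
  rw [PySem.List.foldl_prod_mk
      (fun d v => PySem.Dict.insert d v (d.getD v 0 + 1))
      (fun m v => if v > m then v else m)
      ((PySem.Dict.counter books).values) PySem.Dict.empty 0]
  set vs := (PySem.Dict.counter books).values with hvs
  have hvs_eq : vs = (PySem.List.dedup books).map (fun k => (books.count k : Int)) := by
    rw [hvs]
    show ((PySem.Dict.counter books).items.map (·.2)) = _
    rw [PySem.Dict.items_counter, List.map_map, ← PySem.List.dedup_eq_ofList]
    rfl
  rw [PySem.Dict.foldl_insert_getD_add_one_eq_counter]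
  -- the max fold over the (cast) multiplicities is pvM
  have hmax : vs.foldl (fun m v => if v > m then v else m) 0 = (pvM books : Int) := by
    rw [hvs_eq]
    unfold pvM
    generalize PySem.List.dedup books = l
    rw [show (0 : Int) = ((0 : Nat) : Int) by norm_num]
    generalize (0 : Nat) = a
    induction l generalizing a with
    | nil => simp
    | cons x l ih =>
      simp only [List.map_cons, List.foldl_cons]
      rw [show ((if (books.count x : Int) > (a : Int) then (books.count x : Int) else (a : Int)))
            = ((max a (books.count x) : Nat) : Int) by
        rcases max_cases a (books.count x) with ⟨he, hle⟩ | ⟨he, hlt⟩ <;>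
          · rw [he]; split <;> push_cast <;> omega]
      exact ih (max a (books.count x))
  dsimp only
  rw [hmax, fold_suffix vs (pvM books) 0 []]
  have hTtop : pvT vs (pvM books + 1) = 0 := by
    unfold pvT
    rw [List.countP_eq_zero]
    intro v hv
    rw [hvs_eq] at hv
    obtain ⟨x, hx, rfl⟩ := List.mem_map.mp hv
    have hxb : x ∈ books := (PySem.List.mem_dedup books x).mp hx
    have := count_le_pvM books x hxb
    simp only [decide_eq_true_eq]
    push_cast
    omega
  unfold pvSpec
  rw [List.nil_append]
  -- reverse of the descending list is the ascending spec list
  apply List.ext_getElem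
  · simp
  intro i h1 h2
  simp only [List.getElem_reverse, List.getElem_map, List.getElem_range]
  simp only [List.length_map, List.length_range] at h1 h2 ⊢
  rw [hTtop]
  have harg : pvM books - (pvM books - 1 - i) = i + 1 := by omega
  rw [harg]
  have : pvC books (i + 1) = pvT vs (i + 1) := by
    unfold pvC pvT
    rw [hvs_eq, List.countP_map]
    refine List.countP_congr ?_
    intro x _
    simp only [Function.comp, decide_eq_true_eq]
    push_cast
    omega
  rw [this]
  push_cast
  ring

-- ===== VERDICT (by name: the statement is the Claim_ definition above) =====
theorem group_into_sets_spec : Claim_equal_group_into_sets := by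
  intro books _
  unfold Spec_group_into_sets
  rw [A_eq_spec, B_eq_spec]
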